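-- pv_equiv track=rewrite | github.com/Arif-Soil/soil-quality-app | app.py | get_soil_rating
-- ===== SOURCE A (Python) =====
-- def get_soil_rating(score):
--     ratings = [
--         (20, "Very Poor", "#DC2626"),
--         (30, "Poor", "#EA580C"),
--         (50, "Fair", "#F59E0B"),
--         (70, "Good", "#10B981"),
--         (85, "Very Good", "#059669"),
--         (101, "Excellent", "#047857")
--     ]
--     for limit, label, color in ratings:
--         if score < limit:
--             return label, color
--     return "Unknown", "#6B7280"
-- ===== SOURCE B (Python) =====
-- import bisect
--
-- _LIMITS = [20, 30, 50, 70, 85, 101]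
-- _OUTPUTS = [
--     ("Very Poor", "#DC2626"),
--     ("Poor", "#EA580C"),
--     ("Fair", "#F59E0B"),
--     ("Good", "#10B981"),
--     ("Very Good", "#059669"),
--     ("Excellent", "#047857"),
-- ]
--
-- def get_soil_rating(score):
--     idx = bisect.bisect_right(_LIMITS, score)
--     if idx < len(_OUTPUTS):
--         return _OUTPUTS[idx]
--     return "Unknown", "#6B7280"
-- ===== Notes on version B (the rewrite author's own statement) =====
-- stated objective: idiomatic
-- what changed: Replaced the linear scan over (limit,label,color) tuples with bisect_right binary search over a sorted limits array indexing a parallel outputs array.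
import Mathlib
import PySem

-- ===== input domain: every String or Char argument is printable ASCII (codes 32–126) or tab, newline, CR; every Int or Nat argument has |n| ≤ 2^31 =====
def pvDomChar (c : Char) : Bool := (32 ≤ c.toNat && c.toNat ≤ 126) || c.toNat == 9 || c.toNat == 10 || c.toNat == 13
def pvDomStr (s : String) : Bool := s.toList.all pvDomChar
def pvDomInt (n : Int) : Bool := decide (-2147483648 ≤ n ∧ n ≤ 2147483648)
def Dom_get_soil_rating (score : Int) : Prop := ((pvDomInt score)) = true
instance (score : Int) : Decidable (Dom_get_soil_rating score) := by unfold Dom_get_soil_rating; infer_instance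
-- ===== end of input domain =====

-- B replaces A's linear scan through (limit, label, color) tuples by a bisect_right
-- binary search over a sorted limits array with a parallel outputs array (idiomatic).

-- ===== PORT A =====
-- the 'for limit, label, color in ratings: if score < limit: return label, color' loop
def pvRatingLoop (score : Int) : List (Int × String × String) → String × String
  | [] => ("Unknown", "#6B7280")
  | (limit, label, color) :: rest =>
      if score < limit then (label, color) else pvRatingLoop score rest

def get_soil_rating (score : Int) : String × String :=
  pvRatingLoop score
    [ (20, "Very Poor", "#DC2626"),
      (30, "Poor", "#EA580C"),
      (50, "Fair", "#F59E0B"),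
      (70, "Good", "#10B981"),
      (85, "Very Good", "#059669"),
      (101, "Excellent", "#047857") ]

-- ===== PORT B =====
-- transliteration of CPython's bisect.bisect_right inner loop:
-- while lo < hi: mid = (lo+hi)//2; if x < a[mid]: hi = mid else: lo = mid+1
def pvBisectRight (a : List Int) (x : Int) (lo hi : Nat) : Nat :=
  if lo < hi then
    let mid := (lo + hi) / 2
    if x < a.getD mid 0 then pvBisectRight a x lo mid
    else pvBisectRight a x (mid + 1) hi
  else lo
termination_by hi - lo
decreasing_by all_goals omega

def pvLimits : List Int := [20, 30, 50, 70, 85, 101]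

def pvOutputs : List (String × String) :=
  [ ("Very Poor", "#DC2626"),
    ("Poor", "#EA580C"),
    ("Fair", "#F59E0B"),
    ("Good", "#10B981"),
    ("Very Good", "#059669"),
    ("Excellent", "#047857") ]

-- 'if idx < len(outputs): return outputs[idx] else default' is List.getD
def get_soil_rating_alt (score : Int) : String × String :=
  let idx := pvBisectRight pvLimits score 0 pvLimits.length
  pvOutputs.getD idx ("Unknown", "#6B7280")

-- ===== PRECONDITION & SPEC =====
def Spec_get_soil_rating (score : Int) (out : String × String) : Prop := out = get_soil_rating_alt score
instance (score : Int) (out : String × String) : Decidable (Spec_get_soil_rating score out) := by unfold Spec_get_soil_rating; infer_instance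

-- ===== CLAIM (what is proved, stated in full; the proofs are below) =====
def Claim_equal_get_soil_rating : Prop := ∀ (score : Int), Dom_get_soil_rating score → Spec_get_soil_rating score (get_soil_rating score)

-- ===== LEMMAS AND PROOFS =====

-- ===== VERDICT (by name: the statement is the Claim_ definition above) =====
theorem get_soil_rating_spec : Claim_equal_get_soil_rating := by
  intro score _
  unfold Spec_get_soil_rating get_soil_rating get_soil_rating_alt
  by_cases h1 : score < 20 <;> by_cases h2 : score < 30 <;> by_cases h3 : score < 50 <;>
    by_cases h4 : score < 70 <;> by_cases h5 : score < 85 <;> by_cases h6 : score < 101 <;>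
    simp [pvBisectRight.eq_def, pvLimits, pvOutputs, pvRatingLoop, List.getD,
      h1, h2, h3, h4, h5, h6] <;> omega
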